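-- pv_equiv track=rewrite | github.com/HDDLGym/HDDLGym | jaxmarl/viz/overcooked_visualizer_v2.py | update_status_with_labels
-- ===== SOURCE A (Python) =====
-- def update_status_with_labels(status_dict, status_index):
--     updated_status_dict = {}
--     reverse_status_index = {v: k for k, v in status_index.items()}
--
--     for key, value in status_dict.items():
--         status_label = reverse_status_index.get(key, "unknown")
--         status_type = '_'.join(status_label.split('_')[4:])
--         updated_status_dict[key] = (value, status_type)
--
--     updated_status_dict[0] = ((0, 0), 'empty')
--     return updated_status_dict
-- ===== SOURCE B (Python) =====
-- def update_status_with_labels(status_dict, status_index):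
--     # No reverse-index dict at all: the label of a key is the LAST status_index
--     # entry mapping to it (same as dict-overwrite semantics), found by a scan.
--     def type_of(k):
--         label = "unknown"
--         for lbl, idx in status_index.items():
--             if idx == k:
--                 label = lbl
--         return '_'.join(label.split('_')[4:])
--     updated = {k: (v, type_of(k)) for k, v in status_dict.items()}
--     updated[0] = ((0, 0), 'empty')
--     return updated
-- ===== Notes on version B (the rewrite author's own statement) =====
-- stated objective: alternative
-- what changed: B eliminates A's reverse-index dict: each key's label is found by a direct last-match scan of status_index inside the comprehension, trading A's O(n+m) two-dict construction for a dict-free O(n*m) scan per key.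
import Mathlib
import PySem

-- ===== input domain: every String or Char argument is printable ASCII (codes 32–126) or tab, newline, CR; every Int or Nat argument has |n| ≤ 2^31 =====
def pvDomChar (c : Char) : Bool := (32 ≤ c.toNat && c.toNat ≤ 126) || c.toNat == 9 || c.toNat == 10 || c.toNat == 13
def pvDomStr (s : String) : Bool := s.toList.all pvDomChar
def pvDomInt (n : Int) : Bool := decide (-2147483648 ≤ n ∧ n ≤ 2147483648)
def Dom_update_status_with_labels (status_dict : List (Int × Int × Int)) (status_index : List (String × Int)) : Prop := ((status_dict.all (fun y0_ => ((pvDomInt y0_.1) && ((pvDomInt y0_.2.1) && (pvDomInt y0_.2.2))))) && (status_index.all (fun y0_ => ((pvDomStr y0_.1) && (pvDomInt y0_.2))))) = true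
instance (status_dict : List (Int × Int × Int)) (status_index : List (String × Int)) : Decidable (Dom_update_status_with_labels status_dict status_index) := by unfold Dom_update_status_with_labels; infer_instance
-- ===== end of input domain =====

-- B drops A's reverse-index dict: each key's label is found by a direct last-match
-- scan of status_index (objective: alternative, dict-free lookup; not faster).

-- shared helper: '_'.join(lbl.split('_')[4:])  (sep "_" is non-empty, so split? is `some`)
def pvTyp (lbl : String) : String :=
  PySem.Str.join "_" (PySem.List.slice ((PySem.Str.split? lbl "_").getD []) (some 4) none)

-- ===== PORT A =====
def update_status_with_labels (status_dict : List (Int × Int × Int)) (status_index : List (String × Int)) : List (Int × (Int × Int) × String) :=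
  let reverse_status_index : PySem.Dict Int String :=
    status_index.foldl (fun d kv => d.insert kv.2 kv.1) PySem.Dict.empty
  let updated : PySem.Dict Int ((Int × Int) × String) :=
    status_dict.foldl (fun d kv =>
      let status_label := reverse_status_index.getD kv.1 "unknown"
      d.insert kv.1 (kv.2, pvTyp status_label)) PySem.Dict.empty
  (updated.insert 0 ((0, 0), "empty")).items

-- ===== PORT B =====
-- def type_of(k): scan status_index, remember the last label whose idx == k
def pvTypeOf (status_index : List (String × Int)) (k : Int) : String :=
  pvTyp (status_index.foldl (fun label li => if li.2 == k then li.1 else label) "unknown")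

def update_status_with_labels_alt (status_dict : List (Int × Int × Int)) (status_index : List (String × Int)) : List (Int × (Int × Int) × String) :=
  let updated : PySem.Dict Int ((Int × Int) × String) :=
    status_dict.foldl (fun d kv => d.insert kv.1 (kv.2, pvTypeOf status_index kv.1)) PySem.Dict.empty
  (updated.insert 0 ((0, 0), "empty")).items

-- ===== PRECONDITION & SPEC =====
def Spec_update_status_with_labels (status_dict : List (Int × Int × Int)) (status_index : List (String × Int)) (out : List (Int × (Int × Int) × String)) : Prop := out = update_status_with_labels_alt status_dict status_index
instance (status_dict : List (Int × Int × Int)) (status_index : List (String × Int)) (out : List (Int × (Int × Int) × String)) : Decidable (Spec_update_status_with_labels status_dict status_index out) := by unfold Spec_update_status_with_labels; infer_instance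

-- ===== CLAIM (what is proved, stated in full; the proofs are below) =====
def Claim_equal_update_status_with_labels : Prop := ∀ (status_dict : List (Int × Int × Int)) (status_index : List (String × Int)), Dom_update_status_with_labels status_dict status_index → Spec_update_status_with_labels status_dict status_index (update_status_with_labels status_dict status_index)

-- ===== LEMMAS AND PROOFS =====

-- the reverse-index lookup A performs equals B's last-match scan
theorem pvRev_eq_scan (si : List (String × Int)) (r : PySem.Dict Int String) (k : Int) :
    (si.foldl (fun d kv => d.insert kv.2 kv.1) r).getD k "unknown"
      = si.foldl (fun label li => if li.2 == k then li.1 else label) (r.getD k "unknown") := by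
  induction si generalizing r with
  | nil => rfl
  | cons li rest ih =>
    simp only [List.foldl_cons]
    rw [ih]
    congr 1
    rw [PySem.Dict.getD_insert]
    by_cases h : li.2 = k
    · subst h; simp
    · have h2 : ¬ k = li.2 := fun hh => h hh.symm
      simp [h, h2]

-- ===== VERDICT (by name: the statement is the Claim_ definition above) =====
theorem update_status_with_labels_spec : Claim_equal_update_status_with_labels := by
  intro sd si _
  unfold Spec_update_status_with_labels update_status_with_labels update_status_with_labels_alt
  simp only []
  have hfun : (fun (d : PySem.Dict Int ((Int × Int) × String)) (kv : Int × Int × Int) =>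
        d.insert kv.1 (kv.2, pvTyp ((si.foldl (fun d kv => d.insert kv.2 kv.1) PySem.Dict.empty).getD kv.1 "unknown")))
      = (fun d kv => d.insert kv.1 (kv.2, pvTypeOf si kv.1)) := by
    funext d kv
    rw [pvRev_eq_scan, PySem.Dict.getD_empty, pvTypeOf]
  rw [hfun]
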